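-- pv_equiv track=rewrite | github.com/lehancode/uba_computacion | parciales/Python - ComB-20241126/solucion.py | subsecuencia_mas_larga
-- ===== SOURCE A (Python) =====
-- def subsecuencia_mas_larga(v: list[int]) -> tuple[int,int]:
--   longitud: int = 0
--   indice: int = 0
--   indice_actual: int = 0
--   longitud_actual: int = 1
--
--   for i in range(len(v)-1):
--     if abs(v[i] - v[i+1]) != 1:
--       if longitud_actual > longitud:
--         longitud = longitud_actual
--         indice = indice_actual
--       indice_actual = i + 1
--       longitud_actual = 1
--     else:
--       longitud_actual += 1
--   if longitud_actual > longitud: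
--     longitud = longitud_actual
--     indice = indice_actual
--
--   return (longitud, indice)
-- ===== SOURCE B (Python) =====
-- def subsecuencia_mas_larga(v: list[int]) -> tuple[int, int]:
--     # dp pass: runs[i] = length of the run of unit-steps ending at index i
--     runs = []
--     cur = 0
--     prev = None
--     for x in v:
--         if prev is not None and abs(x - prev) == 1:
--             cur = cur + 1
--         else:
--             cur = 1
--         runs.append(cur)
--         prev = x
--     # argmax pass: first run reaching the maximal length wins
--     best = (1, 0)
--     for i, r in enumerate(runs):
--         if r > best[0]:
--             best = (r, i - r + 1)
--     return best
-- ===== Notes on version B (the rewrite author's own statement) =====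
-- stated objective: alternative
-- what changed: A does everything in one index loop over adjacent pairs with a running best updated at run breaks; B decomposes into two passes: a dp pass building runs[i] = length of the unit-step run ending at i, then an argmax pass over enumerate(runs) picking the first maximal run.
import Mathlib
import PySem

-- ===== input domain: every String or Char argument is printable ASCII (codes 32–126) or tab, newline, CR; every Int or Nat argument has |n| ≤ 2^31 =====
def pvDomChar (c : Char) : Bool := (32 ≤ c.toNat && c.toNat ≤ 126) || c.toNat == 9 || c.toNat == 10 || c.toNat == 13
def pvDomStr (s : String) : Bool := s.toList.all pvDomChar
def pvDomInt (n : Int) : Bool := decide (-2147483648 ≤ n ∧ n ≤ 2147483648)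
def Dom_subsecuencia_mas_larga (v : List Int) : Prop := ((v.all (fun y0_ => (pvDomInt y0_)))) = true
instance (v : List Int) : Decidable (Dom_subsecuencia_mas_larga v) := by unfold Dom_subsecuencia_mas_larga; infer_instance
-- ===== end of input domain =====

-- B replaces A's single index loop with a two-pass decomposition (dp run-length array, then argmax); objective: alternative, same cost.

-- ===== PORT A =====
-- loop body of A's 'for i in range(len(v)-1)': state = (longitud, indice, indice_actual, longitud_actual)
def pvBodyA (v : List Int) (s : Int × Int × Int × Int) (i : Int) : Int × Int × Int × Int :=
  if (PySem.List.pyGetD v i 0 - PySem.List.pyGetD v (i + 1) 0).natAbs ≠ 1 then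
    if s.2.2.2 > s.1 then (s.2.2.2, s.2.2.1, i + 1, 1) else (s.1, s.2.1, i + 1, 1)
  else (s.1, s.2.1, s.2.2.1, s.2.2.2 + 1)

def subsecuencia_mas_larga (v : List Int) : Int × Int :=
  let s := (PySem.List.pyRange 0 ((v.length : Int) - 1) 1).foldl (pvBodyA v) (0, 0, 0, 1)
  if s.2.2.2 > s.1 then (s.2.2.2, s.2.2.1) else (s.1, s.2.1)

-- ===== PORT B =====
-- first loop of Source B: state = (runs, cur, prev)
def pvRunStep (s : List Int × Int × Option Int) (x : Int) : List Int × Int × Option Int :=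
  let cur' : Int :=
    match s.2.2 with
    | some p => if (x - p).natAbs = 1 then s.2.1 + 1 else 1
    | none => 1
  (s.1 ++ [cur'], cur', some x)

-- second loop of Source B: best = (best_len, best_start)
def pvBestStep (b : Int × Int) (ir : Int × Int) : Int × Int :=
  if ir.2 > b.1 then (ir.2, ir.1 - ir.2 + 1) else b

def subsecuencia_mas_larga_alt (v : List Int) : Int × Int :=
  let runs := (v.foldl pvRunStep ([], 0, none)).1
  (PySem.List.enumerate runs 0).foldl pvBestStep (1, 0)

-- ===== PRECONDITION & SPEC =====
def Spec_subsecuencia_mas_larga (v : List Int) (out : Int × Int) : Prop := out = subsecuencia_mas_larga_alt v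
instance (v : List Int) (out : Int × Int) : Decidable (Spec_subsecuencia_mas_larga v out) := by unfold Spec_subsecuencia_mas_larga; infer_instance

-- ===== CLAIM (what is proved, stated in full; the proofs are below) =====
def Claim_equal_subsecuencia_mas_larga : Prop := ∀ (v : List Int), Dom_subsecuencia_mas_larga v → Spec_subsecuencia_mas_larga v (subsecuencia_mas_larga v)

-- ===== LEMMAS AND PROOFS =====

-- structural rendering of A's loop (index i carried explicitly)
def pvGoA : Int → List Int → Int → Int → Int → Int → Int → Int × Int × Int × Int
  | _, [], _, L, I, ia, la => (L, I, ia, la)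
  | prev, y :: rest, i, L, I, ia, la =>
    if (prev - y).natAbs ≠ 1 then
      if la > L then pvGoA y rest (i + 1) la ia (i + 1) 1
      else pvGoA y rest (i + 1) L I (i + 1) 1
    else pvGoA y rest (i + 1) L I ia (la + 1)
def pvFlush (s : Int × Int × Int × Int) : Int × Int :=
  if s.2.2.2 > s.1 then (s.2.2.2, s.2.2.1) else (s.1, s.2.1)

def pvRunsFrom : Int → List Int → Int → List Int
  | _, [], _ => []
  | prev, x :: xs, cur =>
    (if (x - prev).natAbs = 1 then cur + 1 else 1) :: pvRunsFrom x xs (if (x - prev).natAbs = 1 then cur + 1 else 1)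

lemma pvA_loop (rest : List Int) : ∀ (v : List Int) (k : Nat) (prev L I ia la : Int),
    v.drop k = prev :: rest →
    (PySem.List.pyRange (k : Int) ((v.length : Int) - 1) 1).foldl (pvBodyA v) (L, I, ia, la)
      = pvGoA prev rest (k : Int) L I ia la := by
  induction rest with
  | nil =>
    intro v k prev L I ia la hd
    have hlen : v.length = k + 1 := by
      have := congrArg List.length hd
      simp [List.length_drop] at this
      omega
    rw [PySem.List.pyRange_one_eq_nil (by rw [hlen]; push_cast; omega)]
    rfl
  | cons y t ih =>
    intro v k prev L I ia la hd
    have hlen : v.length = k + (t.length + 2) := by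
      have := congrArg List.length hd
      simp [List.length_drop] at this
      omega
    have hk : (k : Int) < (v.length : Int) - 1 := by rw [hlen]; push_cast; omega
    have hget0 : PySem.List.pyGetD v (k : Int) 0 = prev := by
      rw [PySem.List.pyGetD_natCast]
      have h0 : v[k]? = some prev := by
        rw [← Nat.add_zero k, ← List.getElem?_drop, hd]; rfl
      simp [List.getD, h0]
    have hget1 : PySem.List.pyGetD v ((k : Int) + 1) 0 = y := by
      rw [show ((k : Int) + 1) = ((k + 1 : Nat) : Int) by push_cast; ring,
          PySem.List.pyGetD_natCast]
      have h1 : v[k + 1]? = some y := by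
        rw [← List.getElem?_drop, hd]; rfl
      simp [List.getD, h1]
    have hdrop : v.drop (k + 1) = y :: t := by
      have hdd := congrArg (List.drop 1) hd
      simpa [List.drop_drop, Nat.add_comm] using hdd
    have hcast : (k : Int) + 1 = ((k + 1 : Nat) : Int) := by push_cast; ring
    rw [PySem.List.pyRange_one_cons hk, List.foldl_cons]
    by_cases hy : (prev - y).natAbs = 1
    · have hb : pvBodyA v (L, I, ia, la) (k : Int) = (L, I, ia, la + 1) := by
        simp only [pvBodyA, hget0, hget1]
        rw [if_neg (by omega)]
      rw [hb, hcast, ih v (k + 1) y L I ia (la + 1) hdrop]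
      simp only [pvGoA]
      rw [if_neg (by omega), hcast]
    · by_cases hL : la > L
      · have hb : pvBodyA v (L, I, ia, la) (k : Int) = (la, ia, (k : Int) + 1, 1) := by
          simp only [pvBodyA, hget0, hget1]
          rw [if_pos (by omega), if_pos hL]
        rw [hb, hcast, ih v (k + 1) y la ia ((k + 1 : Nat) : Int) 1 hdrop]
        simp only [pvGoA]
        rw [if_pos (show (prev - y).natAbs ≠ 1 from hy), if_pos hL, hcast]
      · have hb : pvBodyA v (L, I, ia, la) (k : Int) = (L, I, (k : Int) + 1, 1) := by
          simp only [pvBodyA, hget0, hget1]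
          rw [if_pos (by omega), if_neg hL]
        rw [hb, hcast, ih v (k + 1) y L I ((k + 1 : Nat) : Int) 1 hdrop]
        simp only [pvGoA]
        rw [if_pos (show (prev - y).natAbs ≠ 1 from hy), if_neg hL, hcast]

lemma pvB_runs (xs : List Int) : ∀ (out : List Int) (p cur : Int),
    (xs.foldl pvRunStep (out, cur, some p)).1 = out ++ pvRunsFrom p xs cur := by
  induction xs with
  | nil => intro out p cur; simp [pvRunsFrom]
  | cons x xs ih =>
    intro out p cur
    simp only [List.foldl_cons, pvRunStep, pvRunsFrom]
    by_cases hx : (x - p).natAbs = 1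
    · simp [hx, ih]
    · simp [hx, ih]

lemma pvCore (rest : List Int) : ∀ (prev i L I ia la : Int), 1 ≤ la → ia = i - la + 1 →
    pvFlush (pvGoA prev rest i L I ia la)
      = (PySem.List.enumerate (pvRunsFrom prev rest la) (i + 1)).foldl pvBestStep (pvFlush (L, I, ia, la)) := by
  induction rest with
  | nil => intro prev i L I ia la h1 h2; simp [pvGoA, pvRunsFrom]
  | cons y t ih =>
    intro prev i L I ia la h1 h2
    by_cases hy : (prev - y).natAbs = 1
    · have hy' : (y - prev).natAbs = 1 := by omega
      simp only [pvGoA, pvRunsFrom, hy, hy', if_pos, ite_not]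
      rw [ih y (i + 1) L I ia (la + 1) (by omega) (by omega)]
      rw [PySem.List.enumerate_cons, List.foldl_cons]
      have hstep : pvBestStep (pvFlush (L, I, ia, la)) (i + 1, la + 1) = pvFlush (L, I, ia, la + 1) := by
        simp only [pvBestStep, pvFlush]
        split_ifs <;> simp_all <;> omega
      rw [hstep]
    · have hy' : ¬ (y - prev).natAbs = 1 := by omega
      simp only [pvGoA, pvRunsFrom, hy']
      rw [if_pos (show (prev - y).natAbs ≠ 1 from hy)]
      simp only [if_false]
      rw [PySem.List.enumerate_cons, List.foldl_cons]
      by_cases hL : la > L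
      · rw [if_pos hL, ih y (i + 1) la ia (i + 1) 1 (by omega) (by omega)]
        have hstep : pvBestStep (pvFlush (L, I, ia, la)) (i + 1, 1) = pvFlush (la, ia, i + 1, 1) := by
          simp only [pvBestStep, pvFlush]
          split_ifs <;> simp_all
        rw [hstep]
      · rw [if_neg hL, ih y (i + 1) L I (i + 1) 1 (by omega) (by omega)]
        have hstep : pvBestStep (pvFlush (L, I, ia, la)) (i + 1, 1) = pvFlush (L, I, i + 1, 1) := by
          simp only [pvBestStep, pvFlush]
          split_ifs <;> simp_all
        rw [hstep]

-- ===== VERDICT =====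
theorem subsecuencia_mas_larga_spec : Claim_equal_subsecuencia_mas_larga := by
  intro v _
  unfold Spec_subsecuencia_mas_larga
  match v with
  | [] => decide
  | x :: xs =>
    show pvFlush ((PySem.List.pyRange 0 (((x :: xs).length : Int) - 1) 1).foldl
      (pvBodyA (x :: xs)) (0, 0, 0, 1)) = _
    have h := pvA_loop xs (x :: xs) 0 x 0 0 0 1 (by simp)
    norm_num at h
    have hl : ((x :: xs).length : Int) - 1 = (xs.length : Int) := by simp
    rw [hl, h]
    have h2 := pvCore xs x 0 0 0 0 1 (by norm_num) (by ring)
    norm_num at h2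
    rw [h2]
    unfold subsecuencia_mas_larga_alt
    rw [show (((x :: xs).foldl pvRunStep ([], 0, none)).1) = 1 :: pvRunsFrom x xs 1 by
      simp [List.foldl_cons, pvRunStep, pvB_runs]]
    simp only [PySem.List.enumerate_cons, List.foldl_cons]
    norm_num [pvBestStep, pvFlush]
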